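-- pv_equiv track=rewrite | github.com/tomerkarp/case_tester_2 | tester.py | alt_ordered_subset
-- ===== SOURCE A (Python) =====
-- def alt_ordered_subset(str1, str2):
--     it = iter(str1)
--     last_index = -1
--     for char in str2:
--         try:
--             current_index = next(i for i, c in enumerate(it, start=last_index + 1) if c == char)
--             if current_index == last_index + 1:  # Consecutive letters found
--                 return False
--             last_index = current_index
--         except StopIteration:
--             return False
--     return True
-- ===== SOURCE B (Python) =====
-- def alt_ordered_subset(str1, str2):
--     # Index every character of str1 by its ascending list of positions,
--     # then jump through str2 with a binary search instead of rescanning str1.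
--     positions = {}
--     for i, c in enumerate(str1):
--         positions.setdefault(c, []).append(i)
--     last = -1
--     for ch in str2:
--         plist = positions.get(ch)
--         if plist is None:
--             return False
--         target = last + 1
--         # hand-written bisect_left(plist, target)
--         lo, hi = 0, len(plist)
--         while lo < hi:
--             mid = (lo + hi) // 2
--             if plist[mid] < target:
--                 lo = mid + 1
--             else:
--                 hi = mid
--         if lo == len(plist):
--             return False
--         j = plist[lo]
--         if j == target:  # would be consecutive with the previous match
--             return False
--         last = j
--     return True
-- ===== Notes on version B (the rewrite author's own statement) =====
-- stated objective: alternative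
-- what changed: Replaced A's single shared-iterator scan of str1 with a precomputed char->sorted-position index of str1 plus binary-search (hand-written bisect_left) jumps per character of str2.
import Mathlib
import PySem

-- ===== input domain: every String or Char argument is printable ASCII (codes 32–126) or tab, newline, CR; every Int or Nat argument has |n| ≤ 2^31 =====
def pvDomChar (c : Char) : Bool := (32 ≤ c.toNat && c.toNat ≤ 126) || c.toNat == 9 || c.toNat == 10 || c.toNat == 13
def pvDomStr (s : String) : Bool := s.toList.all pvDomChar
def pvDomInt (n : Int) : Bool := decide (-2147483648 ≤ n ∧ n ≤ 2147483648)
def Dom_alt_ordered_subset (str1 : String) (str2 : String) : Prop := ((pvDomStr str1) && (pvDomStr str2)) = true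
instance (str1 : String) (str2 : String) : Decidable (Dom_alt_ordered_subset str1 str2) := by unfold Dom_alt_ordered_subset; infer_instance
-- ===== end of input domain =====

-- B replaces A's single shared-iterator scan of str1 by a precomputed char→positions
-- index of str1 plus a binary-search jump per character of str2 (alternative algorithm,
-- similar cost); same return value on every input.

-- ===== PORT A =====
-- 'next(i for i, c in enumerate(it, start=last_index+1) if c == char)': scan the
-- remaining iterator, returning the matching index and the iterator's remainder
-- (none = StopIteration).
def aFind (c : Char) (i : Int) (l : List Char) : Option (Int × List Char) :=
  match l with
  | [] => none
  | x :: xs => if x = c then some (i, xs) else aFind c (i + 1) xs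

def aLoop (chars2 : List Char) (it : List Char) (last : Int) : Bool :=
  match chars2 with
  | [] => true
  | ch :: rest =>
    match aFind ch (last + 1) it with
    | none => false
    | some (ci, it') => if ci = last + 1 then false else aLoop rest it' ci

def alt_ordered_subset (str1 : String) (str2 : String) : Bool :=
  aLoop str2.toList str1.toList (-1)

-- ===== PORT B =====
-- Source B's hand-written bisect_left loop (while lo < hi …); plist[mid] is in range
-- because mid < hi ≤ plist.length throughout, so List.getD is exact here.
def bBisect (plist : List Int) (target : Int) (lo hi : Nat) : Nat :=
  if _h : lo < hi then
    if plist.getD ((lo + hi) / 2) 0 < target then bBisect plist target ((lo + hi) / 2 + 1) hi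
    else bBisect plist target lo ((lo + hi) / 2)
  else lo
termination_by hi - lo
decreasing_by all_goals omega

-- 'positions.setdefault(c, []).append(i)' over enumerate(str1)
def bPositions (l : List Char) : PySem.Dict Char (List Int) :=
  (PySem.List.enumerate l).foldl
    (fun d p => d.insert p.2 (d.getD p.2 [] ++ [p.1])) PySem.Dict.empty

def bLoop (chars2 : List Char) (pos : PySem.Dict Char (List Int)) (last : Int) : Bool :=
  match chars2 with
  | [] => true
  | ch :: rest =>
    match pos.get? ch with
    | none => false
    | some plist =>
      let lo := bBisect plist (last + 1) 0 plist.length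
      if lo = plist.length then false
      else if plist.getD lo 0 = last + 1 then false  -- plist[lo], lo < len here
      else bLoop rest pos (plist.getD lo 0)

def alt_ordered_subset_alt (str1 : String) (str2 : String) : Bool :=
  bLoop str2.toList (bPositions str1.toList) (-1)

-- ===== PRECONDITION & SPEC =====
def Spec_alt_ordered_subset (str1 : String) (str2 : String) (out : Bool) : Prop := out = alt_ordered_subset_alt str1 str2
instance (str1 : String) (str2 : String) (out : Bool) : Decidable (Spec_alt_ordered_subset str1 str2 out) := by unfold Spec_alt_ordered_subset; infer_instance

-- ===== CLAIM (what is proved, stated in full; the proofs are below) =====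
def Claim_equal_alt_ordered_subset : Prop := ∀ (str1 : String) (str2 : String), Dom_alt_ordered_subset str1 str2 → Spec_alt_ordered_subset str1 str2 (alt_ordered_subset str1 str2)

-- ===== LEMMAS AND PROOFS =====

-- the ascending list of positions of c in l (specification of bPositions's entries)
def posOf (l : List Char) (c : Char) : List Int :=
  ((PySem.List.enumerate l).filter (fun p => p.2 == c)).map (fun p => p.1)

-- common reference recursion both loops are reduced to
def refLoop (l : List Char) (chars2 : List Char) (k : Nat) : Bool :=
  match chars2 with
  | [] => true
  | ch :: rest =>
    match (l.drop k).findIdx? (· == ch) with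
    | none => false
    | some n => if n = 0 then false else refLoop l rest (k + n + 1)

lemma aFind_eq (c : Char) (tail : List Char) (i : Int) :
    aFind c i tail = (tail.findIdx? (· == c)).map (fun (n : Nat) => (i + (n : Int), tail.drop (n + 1))) := by
  induction tail generalizing i with
  | nil => simp [aFind]
  | cons x xs ih =>
    by_cases h : x = c
    · simp [aFind, h, List.findIdx?_cons]
    · rw [aFind, if_neg h, ih, List.findIdx?_cons]
      simp only [beq_iff_eq, h, if_false, Option.map_map]
      cases hx : xs.findIdx? (· == c) with
      | none => simp
      | some n => simp [Function.comp]; omega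

lemma mem_posOf (l : List Char) (c : Char) (j : Int) :
    j ∈ posOf l c ↔ ∃ (m : Nat) (_h : m < l.length), j = (m : Int) ∧ l[m] = c := by
  simp only [posOf, List.mem_map, List.mem_filter, PySem.List.mem_enumerate_iff]
  constructor
  · rintro ⟨p, ⟨⟨k, hk, rfl⟩, hpc⟩, rfl⟩
    exact ⟨k, hk, by simp, by simpa using hpc⟩
  · rintro ⟨m, hm, rfl, hc⟩
    exact ⟨((m : Int), l[m]), ⟨⟨m, hm, by simp⟩, by simpa using hc⟩, rfl⟩

lemma posOf_pairwise (l : List Char) (c : Char) : (posOf l c).Pairwise (· ≤ ·) :=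
  List.Pairwise.map _ (fun a b (h : a.1 < b.1) => le_of_lt h)
    ((PySem.List.pairwise_lt_enumerate l 0).filter _)

lemma bPositions_go (ps : List (Int × Char)) (d : PySem.Dict Char (List Int)) (c : Char) :
    (ps.foldl (fun d p => d.insert p.2 (d.getD p.2 [] ++ [p.1])) d).get? c =
      (if ((ps.filter (fun p => p.2 == c)).map (fun p => p.1)) = [] then d.get? c
       else some (d.getD c [] ++ (ps.filter (fun p => p.2 == c)).map (fun p => p.1))) := by
  induction ps generalizing d with
  | nil => simp
  | cons p ps ih =>
    rw [List.foldl_cons, ih]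
    by_cases h : p.2 = c
    · simp only [List.filter_cons, h, beq_self_eq_true, if_true, List.map_cons,
        PySem.Dict.get?_insert_self, PySem.Dict.getD_insert_self]
      by_cases hr : (ps.filter (fun p => p.2 == c)).map (fun p => p.1) = [] <;>
        simp [hr]
    · have hne : c ≠ p.2 := fun hc => h hc.symm
      rw [PySem.Dict.get?_insert_of_ne _ _ hne, PySem.Dict.getD_insert_of_ne _ _ _ hne,
        List.filter_cons, if_neg (show ¬((p.2 == c) = true) by simp [h])]

lemma bPositions_get? (l : List Char) (c : Char) :
    (bPositions l).get? c = if posOf l c = [] then none else some (posOf l c) := by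
  rw [bPositions, bPositions_go]
  unfold posOf
  split_ifs <;> simp_all [PySem.Dict.get?_empty, PySem.Dict.getD_empty]

lemma bBisect_spec (n : Nat) (plist : List Int) (t : Int) :
    ∀ (lo hi : Nat), hi - lo = n → plist.Pairwise (· ≤ ·) → hi ≤ plist.length → lo ≤ hi →
    (∀ (j : Nat) (hj : j < plist.length), j < lo → plist[j] < t) →
    (∀ (j : Nat) (hj : j < plist.length), hi ≤ j → t ≤ plist[j]) →
    bBisect plist t lo hi ≤ plist.length ∧
      (∀ (j : Nat) (hj : j < plist.length), j < bBisect plist t lo hi → plist[j] < t) ∧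
      (∀ (j : Nat) (hj : j < plist.length), bBisect plist t lo hi ≤ j → t ≤ plist[j]) := by
  induction n using Nat.strong_induction_on with
  | _ n ih =>
    intro lo hi hn hs hhi hlohi hlow hhigh
    have hpw := List.pairwise_iff_getElem.mp hs
    rw [bBisect]
    by_cases hlt : lo < hi
    · rw [dif_pos hlt]
      have hmlen : (lo + hi) / 2 < plist.length := by omega
      rw [List.getD_eq_getElem plist 0 (by omega)]
      by_cases hc : plist[(lo + hi) / 2] < t
      · rw [if_pos hc]
        exact ih (hi - ((lo + hi) / 2 + 1)) (by omega) _ _ rfl hs hhi (by omega)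
          (fun j hj hjl => by
            rcases Nat.lt_or_ge j lo with h' | h'
            · exact hlow j hj h'
            · rcases Nat.eq_or_lt_of_le (show j ≤ (lo + hi) / 2 by omega) with h'' | h''
              · subst h''; exact hc
              · exact lt_of_le_of_lt (hpw j ((lo + hi) / 2) hj hmlen h'') hc)
          hhigh
      · rw [if_neg hc]
        exact ih ((lo + hi) / 2 - lo) (by omega) _ _ rfl hs (by omega) (by omega) hlow
          (fun j hj hjl => by
            rcases Nat.eq_or_lt_of_le hjl with h'' | h''
            · subst h''; omega
            · exact le_trans (by omega) (hpw ((lo + hi) / 2) j hmlen hj h''))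
    · rw [dif_neg hlt]
      exact ⟨by omega, fun j hj hjlo => hlow j hj hjlo,
        fun j hj hjlo => hhigh j hj (by omega)⟩

lemma A_eq_ref (l : List Char) (chars2 : List Char) (k : Nat) :
    aLoop chars2 (l.drop k) ((k : Int) - 1) = refLoop l chars2 k := by
  induction chars2 generalizing k with
  | nil => rfl
  | cons ch rest ih =>
    rw [aLoop, refLoop]
    have hk1 : ((k : Int) - 1 + 1) = (k : Int) := by ring
    rw [hk1, aFind_eq]
    cases hf : (l.drop k).findIdx? (· == ch) with
    | none => simp
    | some n =>
      simp only [Option.map_some]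
      by_cases h0 : n = 0
      · subst h0; simp
      · rw [if_neg h0]
        have hne : ¬((k : Int) + (n : Int) = (k : Int)) := by omega
        rw [if_neg hne, List.drop_drop]
        have h1 : k + (n + 1) = k + n + 1 := by omega
        have h2 : (k : Int) + (n : Int) = ((k + n + 1 : Nat) : Int) - 1 := by push_cast; ring
        rw [h1, h2]
        exact ih (k + n + 1)

lemma B_eq_ref (l : List Char) (chars2 : List Char) (k : Nat) :
    bLoop chars2 (bPositions l) ((k : Int) - 1) = refLoop l chars2 k := by
  induction chars2 generalizing k with
  | nil => rfl
  | cons ch rest ih =>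
    rw [bLoop, refLoop, bPositions_get?]
    have hk1 : ((k : Int) - 1 + 1) = (k : Int) := by ring
    by_cases hP : posOf l ch = []
    · rw [if_pos hP]
      have hnone : (l.drop k).findIdx? (· == ch) = none := by
        rw [List.findIdx?_eq_none_iff]
        intro x hx
        by_contra hxc
        have hxch : x = ch := by simpa using hxc
        obtain ⟨m, hm, hxm⟩ := List.mem_iff_getElem.mp (List.mem_of_mem_drop hx)
        have : (m : Int) ∈ posOf l ch := (mem_posOf l ch m).mpr ⟨m, hm, rfl, by rw [hxm, hxch]⟩
        simp [hP] at this
      rw [hnone]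
    · rw [if_neg hP]
      simp only [hk1]
      set P := posOf l ch with hPdef
      have hspec := bBisect_spec P.length P (k : Int) 0 P.length (by omega)
        (posOf_pairwise l ch) (le_refl _) (Nat.zero_le _)
        (fun j hj hjl => by omega) (fun j hj hjl => by omega)
      obtain ⟨hr_le, hr_lo, hr_hi⟩ := hspec
      set r := bBisect P (k : Int) 0 P.length with hrdef
      have hPentry : ∀ (idx : Nat) (hidx : idx < P.length),
          ∃ (m : Nat) (_hm : m < l.length), P[idx] = (m : Int) ∧ l[m] = ch := by
        intro idx hidx
        have := (mem_posOf l ch P[idx]).mp (List.getElem_mem hidx)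
        obtain ⟨m, hm, he, hc⟩ := this
        exact ⟨m, hm, he, hc⟩
      cases hf : (l.drop k).findIdx? (· == ch) with
      | none =>
        have hrlen : r = P.length := by
          by_contra hne
          have hrlt : r < P.length := lt_of_le_of_ne hr_le hne
          obtain ⟨m, hm, he, hc⟩ := hPentry r hrlt
          have hmk : k ≤ m := by
            have := hr_hi r hrlt (le_refl r)
            omega
          have hdl : m - k < (l.drop k).length := by
            rw [List.length_drop]; omega
          have : ((l.drop k)[m - k] == ch) = false :=
            List.findIdx?_eq_none_iff.mp hf _ (List.getElem_mem hdl)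
          rw [List.getElem_drop] at this
          have hkm : k + (m - k) = m := by omega
          simp [hkm, hc] at this
        rw [if_pos hrlen]
      | some n =>
        obtain ⟨hnlt, hpn, hmin⟩ := List.findIdx?_eq_some_iff_getElem.mp hf
        rw [List.getElem_drop] at hpn
        have hknl : k + n < l.length := by
          have := hnlt; rw [List.length_drop] at this; omega
        have hlkn : l[k + n] = ch := by simpa using hpn
        have hminl : ∀ (m : Nat), k ≤ m → m < k + n → ∀ (hm : m < l.length), l[m] ≠ ch := by
          intro m hkm hmkn hm hcontra
          have hj : m - k < n := by omega
          have h3 := hmin (m - k) hj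
          rw [List.getElem_drop] at h3
          have h4 : l[k + (m - k)]'(by omega) = l[m] := by congr 1; omega
          exact h3 (by simp [h4, hcontra])
        have hmemP : ((k + n : Nat) : Int) ∈ P := (mem_posOf l ch _).mpr ⟨k + n, hknl, rfl, hlkn⟩
        obtain ⟨idx, hidx, hPidx⟩ := List.mem_iff_getElem.mp hmemP
        have hridx : r ≤ idx := by
          by_contra hlt
          have := hr_lo idx hidx (by omega)
          rw [hPidx] at this
          omega
        have hrlt : r < P.length := lt_of_le_of_lt hridx hidx
        rw [if_neg (by omega : ¬ r = P.length)]
        have hPr : P[r] = ((k + n : Nat) : Int) := by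
          obtain ⟨m, hm, he, hc⟩ := hPentry r hrlt
          have h1 : ((k : Int)) ≤ P[r] := hr_hi r hrlt (le_refl r)
          have hmk : k ≤ m := by rw [he] at h1; omega
          have hmkn : k + n ≤ m := by
            by_contra hlt
            exact hminl m hmk (by omega) hm hc
          have h2 : P[r] ≤ P[idx] := by
            rcases Nat.eq_or_lt_of_le hridx with heq | hlt
            · subst heq; exact le_refl _
            · exact (List.pairwise_iff_getElem.mp (posOf_pairwise l ch)) r idx hrlt hidx hlt
          rw [hPidx] at h2
          rw [he]
          omega
        rw [List.getD_eq_getElem P 0 hrlt, hPr]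
        show _ = if n = 0 then false else refLoop l rest (k + n + 1)
        by_cases h0 : n = 0
        · subst h0
          simp
        · rw [if_neg (by push_cast; omega : ¬ ((k + n : Nat) : Int) = (k : Int)), if_neg h0]
          have h2 : ((k + n : Nat) : Int) = ((k + n + 1 : Nat) : Int) - 1 := by push_cast; ring
          rw [h2]
          exact ih (k + n + 1)

-- ===== VERDICT (by name: the statement is the Claim_ definition above) =====
theorem alt_ordered_subset_spec : Claim_equal_alt_ordered_subset := by
  intro str1 str2 _
  unfold Spec_alt_ordered_subset alt_ordered_subset alt_ordered_subset_alt
  have h1 := A_eq_ref str1.toList str2.toList 0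
  have h2 := B_eq_ref str1.toList str2.toList 0
  simp only [List.drop_zero, Nat.cast_zero, zero_sub] at h1 h2
  rw [h1, h2]
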